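-- pv_equiv track=rewrite | github.com/hrbigelow/opgrind | schema/api.py | _highlight_mask
-- ===== SOURCE A (Python) =====
-- from collections import defaultdict, OrderedDict
--
-- def _highlight_mask(ranks, sigs, shapes, idx_usage):
--     highlight = defaultdict(list)
--     for arg, sig in sigs.items():
--         shape = shapes[arg]
--         for idx in sig:
--             comp = idx_usage.get(idx, None)
--             if comp is None:
--                 mask = [False] * ranks[idx]
--             else:
--                 mask = [ (len(c) != 1) for c in comp ]
--             highlight[arg].extend(mask)
--     return dict(highlight)
-- ===== SOURCE B (Python) =====
-- def _highlight_mask(ranks, sigs, shapes, idx_usage):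
--     # Stage 1: compute each distinct index's mask once, memoized in idx_mask.
--     idx_mask = {}
--     for sig in sigs.values():
--         for idx in sig:
--             if idx not in idx_mask:
--                 comp = idx_usage.get(idx)
--                 idx_mask[idx] = ([False] * ranks[idx] if comp is None
--                                  else [len(c) != 1 for c in comp])
--     # Stage 2: assemble the output from the precomputed masks; an argument with
--     # an empty signature contributes no entry (A's defaultdict never creates it).
--     out = {}
--     for arg, sig in sigs.items():
--         if sig:
--             out[arg] = [b for idx in sig for b in idx_mask[idx]]
--     return out
-- ===== Notes on version B (the rewrite author's own statement) =====
-- stated objective: alternative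
-- what changed: Two staged passes instead of A's single accumulating double loop: stage one memoizes the boolean mask of every distinct index in a dictionary (each mask is computed once instead of once per occurrence), stage two assembles each non-empty-signature argument's row by concatenating the precomputed masks; shapes is never touched.
import Mathlib
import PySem

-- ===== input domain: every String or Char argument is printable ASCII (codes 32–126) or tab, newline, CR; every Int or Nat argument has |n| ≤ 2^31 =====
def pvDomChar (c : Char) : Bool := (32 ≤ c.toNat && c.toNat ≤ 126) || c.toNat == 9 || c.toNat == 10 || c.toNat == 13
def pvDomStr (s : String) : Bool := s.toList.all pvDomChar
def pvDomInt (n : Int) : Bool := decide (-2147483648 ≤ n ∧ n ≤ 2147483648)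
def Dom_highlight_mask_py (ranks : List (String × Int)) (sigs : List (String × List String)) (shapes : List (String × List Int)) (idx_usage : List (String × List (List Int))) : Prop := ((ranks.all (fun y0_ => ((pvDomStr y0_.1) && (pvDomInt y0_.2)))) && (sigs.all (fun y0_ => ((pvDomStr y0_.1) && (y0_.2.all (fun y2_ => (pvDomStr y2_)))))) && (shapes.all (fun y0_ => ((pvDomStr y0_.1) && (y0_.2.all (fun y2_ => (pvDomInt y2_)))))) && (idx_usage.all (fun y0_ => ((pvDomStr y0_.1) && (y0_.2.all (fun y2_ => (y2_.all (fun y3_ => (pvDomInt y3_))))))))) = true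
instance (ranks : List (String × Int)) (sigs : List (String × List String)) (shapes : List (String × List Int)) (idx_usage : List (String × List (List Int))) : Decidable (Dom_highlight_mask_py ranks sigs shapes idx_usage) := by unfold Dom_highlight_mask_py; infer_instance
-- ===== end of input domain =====

-- B replaces A's single accumulating double loop by two staged passes: first memoize each
-- distinct index's mask in a dictionary, then assemble the rows from it; objective: alternative.

-- ===== PORT A =====
-- Literal port of A: fold over sigs building a defaultdict(list) (PySem.Dict, extend = modify ++),
-- with the (unused but KeyError-raising) shapes[arg] lookup kept as a let; dict(highlight) = .items.
def highlight_mask_py (ranks : List (String × Int)) (sigs : List (String × List String)) (shapes : List (String × List Int)) (idx_usage : List (String × List (List Int))) : List (String × List Bool) :=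
  (sigs.foldl (fun highlight p =>
      let _shape := List.lookup p.1 shapes   -- shapes[arg]; missing key = KeyError, excluded by Pre_
      p.2.foldl (fun highlight idx =>
        let mask : List Bool :=
          match List.lookup idx idx_usage with
          | none => List.replicate ((List.lookup idx ranks).getD 0).toNat false  -- ranks[idx]; missing key excluded by Pre_
          | some comp => comp.map (fun c => c.length != 1)
        highlight.modify p.1 [] (fun cur => cur ++ mask)) highlight)
    PySem.Dict.empty).items

-- ===== PORT B =====
-- Stage 1 of Source B: the memo dictionary idx_mask, mapping each distinct index of any signature
-- to its mask, computed once ('if idx not in idx_mask' = contains guard).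
def pvIdxMaskDict (ranks : List (String × Int)) (sigs : List (String × List String)) (idx_usage : List (String × List (List Int))) : PySem.Dict String (List Bool) :=
  sigs.foldl (fun m p =>
    p.2.foldl (fun m idx =>
      if m.contains idx then m
      else m.insert idx
        (match List.lookup idx idx_usage with
         | none => List.replicate ((List.lookup idx ranks).getD 0).toNat false  -- ranks[idx]; missing key excluded by Pre_
         | some comp => comp.map (fun c => c.length != 1))) m)
    PySem.Dict.empty

-- Stage 2 of Source B: build the output dict from the memoized masks (idx_mask[idx] is always
-- present by stage 1, so .getD [] is exact there); return its items.
def highlight_mask_py_alt (ranks : List (String × Int)) (sigs : List (String × List String)) (shapes : List (String × List Int)) (idx_usage : List (String × List (List Int))) : List (String × List Bool) :=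
  let idx_mask := pvIdxMaskDict ranks sigs idx_usage
  (sigs.foldl (fun out p =>
      if p.2.isEmpty then out
      else out.insert p.1 (p.2.flatMap (fun idx => (idx_mask.get? idx).getD []))) PySem.Dict.empty).items

-- ===== PRECONDITION & SPEC =====
-- Pre_ excludes (a) the KeyError cases (an argument of sigs missing from shapes, or an index whose
-- mask needs ranks missing there), on which A raises, and (b) duplicate argument keys in sigs, which
-- do not encode any Python dict (sigs is a dict in the original).
def Pre_highlight_mask_py (ranks : List (String × Int)) (sigs : List (String × List String)) (shapes : List (String × List Int)) (idx_usage : List (String × List (List Int))) : Prop :=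
  (sigs.map Prod.fst).Nodup ∧
  ∀ p ∈ sigs, (List.lookup p.1 shapes).isSome = true ∧
    ∀ idx ∈ p.2, ((List.lookup idx idx_usage).isSome = true ∨ (List.lookup idx ranks).isSome = true)
instance (ranks : List (String × Int)) (sigs : List (String × List String)) (shapes : List (String × List Int)) (idx_usage : List (String × List (List Int))) : Decidable (Pre_highlight_mask_py ranks sigs shapes idx_usage) := by unfold Pre_highlight_mask_py; infer_instance

def pvWitness_highlight_mask_py : (List (String × Int)) × (List (String × List String)) × (List (String × List Int)) × (List (String × List (List Int))) :=
  ([("i", 2)], [("x", ["i"]), ("y", [])], [("x", [2, 3]), ("y", [])], [("j", [[1, 2], [3]])])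

def Spec_highlight_mask_py (ranks : List (String × Int)) (sigs : List (String × List String)) (shapes : List (String × List Int)) (idx_usage : List (String × List (List Int))) (out : List (String × List Bool)) : Prop := out = highlight_mask_py_alt ranks sigs shapes idx_usage
instance (ranks : List (String × Int)) (sigs : List (String × List String)) (shapes : List (String × List Int)) (idx_usage : List (String × List (List Int))) (out : List (String × List Bool)) : Decidable (Spec_highlight_mask_py ranks sigs shapes idx_usage out) := by unfold Spec_highlight_mask_py; infer_instance

-- ===== CLAIM (what is proved, stated in full; the proofs are below) =====
def Claim_equal_highlight_mask_py : Prop := ∀ (ranks : List (String × Int)) (sigs : List (String × List String)) (shapes : List (String × List Int)) (idx_usage : List (String × List (List Int))), Dom_highlight_mask_py ranks sigs shapes idx_usage → Pre_highlight_mask_py ranks sigs shapes idx_usage → Spec_highlight_mask_py ranks sigs shapes idx_usage (highlight_mask_py ranks sigs shapes idx_usage)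

-- ===== LEMMAS AND PROOFS =====

-- the mask of one index (the common sub-expression of both ports), proof-side abbreviation
def pvMask (ranks : List (String × Int)) (idx_usage : List (String × List (List Int))) (idx : String) : List Bool :=
  match List.lookup idx idx_usage with
  | none => List.replicate ((List.lookup idx ranks).getD 0).toNat false
  | some comp => comp.map (fun c => c.length != 1)

-- ---------- A side: the accumulated defaultdict is the filtered map ----------

-- one inner step on a dict whose last item carries the (fresh elsewhere) key a: in-place extend
lemma pv_modify_last (h : PySem.Dict String (List Bool)) (a : String) (acc v : List Bool)
    (hfresh : h.contains a = false) :
    (PySem.Dict.mk (h.items ++ [(a, acc)])).modify a [] (fun cur => cur ++ v)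
      = PySem.Dict.mk (h.items ++ [(a, acc ++ v)]) := by
  have hall : ∀ p ∈ h.items, ¬ (p.1 == a) = true := by
    simpa [PySem.Dict.contains, List.any_eq_false] using hfresh
  have hfind : h.items.find? (fun p => p.1 == a) = none := List.find?_eq_none.mpr hall
  simp [PySem.Dict.modify, PySem.Dict.insert, PySem.Dict.getD, PySem.Dict.get?,
        PySem.Dict.contains, List.find?_append, hfind]
  have hmap : List.map (fun p => if p.1 = a then (a, acc ++ v) else p) h.items
      = List.map id h.items :=
    List.map_congr_left (fun p hp => by
      simp [show p.1 ≠ a from by simpa using hall p hp])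
  rw [hmap, List.map_id]

-- the whole inner loop once the key is already installed with value acc
lemma pv_inner_aux (f : String → List Bool) (a : String) (sig : List String)
    (h : PySem.Dict String (List Bool)) (acc : List Bool) (hfresh : h.contains a = false) :
    sig.foldl (fun d idx => d.modify a [] (fun cur => cur ++ f idx)) (PySem.Dict.mk (h.items ++ [(a, acc)]))
      = PySem.Dict.mk (h.items ++ [(a, acc ++ sig.flatMap f)]) := by
  induction sig generalizing acc with
  | nil => simp
  | cons x xs ih =>
    simp only [List.foldl_cons, pv_modify_last h a acc (f x) hfresh, ih (acc ++ f x),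
      List.flatMap_cons, List.append_assoc]

-- first modify installs the fresh key at the end
lemma pv_modify_fresh (h : PySem.Dict String (List Bool)) (a : String) (v : List Bool)
    (hfresh : h.contains a = false) :
    h.modify a [] (fun cur => cur ++ v) = PySem.Dict.mk (h.items ++ [(a, v)]) := by
  have hall : ∀ p ∈ h.items, ¬ (p.1 == a) = true := by
    simpa [PySem.Dict.contains, List.any_eq_false] using hfresh
  have hfind : h.items.find? (fun p => p.1 == a) = none := List.find?_eq_none.mpr hall
  simp [PySem.Dict.modify, PySem.Dict.insert, PySem.Dict.getD, PySem.Dict.get?,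
        PySem.Dict.contains, hfind]
  intro x hx
  exact (hall (a, x) hx (by simp)).elim

lemma pv_inner (f : String → List Bool) (a : String) (sig : List String)
    (h : PySem.Dict String (List Bool)) (hfresh : h.contains a = false) :
    sig.foldl (fun d idx => d.modify a [] (fun cur => cur ++ f idx)) h
      = if sig.isEmpty then h else PySem.Dict.mk (h.items ++ [(a, sig.flatMap f)]) := by
  cases sig with
  | nil => simp
  | cons x xs =>
    simp only [List.foldl_cons, pv_modify_fresh h a (f x) hfresh,
      pv_inner_aux f a xs h (f x) hfresh, List.flatMap_cons, List.isEmpty_cons,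
      if_neg Bool.false_ne_true]

lemma pv_contains_mk_append (h : PySem.Dict String (List Bool)) (a : String) (v : List Bool)
    (q : String) : (PySem.Dict.mk (h.items ++ [(a, v)])).contains q = (h.contains q || (a == q)) := by
  simp [PySem.Dict.contains]

-- outer loop invariant of A
lemma pv_outer (f : String → List Bool) (shapes : List (String × List Int))
    (sigs : List (String × List String)) (h : PySem.Dict String (List Bool))
    (hnd : (sigs.map Prod.fst).Nodup) (hfresh : ∀ p ∈ sigs, h.contains p.1 = false) :
    (sigs.foldl (fun d p =>
        let _shape := List.lookup p.1 shapes
        p.2.foldl (fun d idx => d.modify p.1 [] (fun cur => cur ++ f idx)) d) h).items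
      = h.items ++ (sigs.filter (fun p => !p.2.isEmpty)).map (fun p => (p.1, p.2.flatMap f)) := by
  induction sigs generalizing h with
  | nil => simp
  | cons p rest ih =>
    simp only [List.map_cons, List.nodup_cons] at hnd
    have hfp : h.contains p.1 = false := hfresh p (List.mem_cons_self ..)
    simp only [List.foldl_cons, pv_inner f p.1 p.2 h hfp]
    by_cases hemp : p.2.isEmpty
    · rw [if_pos hemp, ih h hnd.2 (fun q hq => hfresh q (List.mem_cons_of_mem _ hq))]
      simp [hemp]
    · rw [if_neg hemp]
      rw [ih _ hnd.2 ?fresh]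
      · simp [hemp]
      case fresh =>
        intro q hq
        rw [pv_contains_mk_append]
        have h1 : h.contains q.1 = false := hfresh q (List.mem_cons_of_mem _ hq)
        have h2 : p.1 ≠ q.1 := by
          intro he; exact hnd.1 (he ▸ List.mem_map_of_mem hq)
        simp [h1, h2]

-- ---------- B side, stage 1: the memo dict stores pvMask and covers every index ----------

-- one memoization step: what it contains
lemma pv_step_contains (f : String → List Bool) (m : PySem.Dict String (List Bool)) (idx k : String) :
    ((if m.contains idx then m else m.insert idx (f idx)).contains k) = (k == idx || m.contains k) := by
  by_cases h : m.contains idx = true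
  · by_cases hk : k = idx
    · subst hk; simp [h]
    · simp [h, hk]
  · simp [Bool.not_eq_true] at h
    simp [h, PySem.Dict.contains_insert]

-- inner memo loop: contains = membership-or-before
lemma pv_fold1_contains (f : String → List Bool) (sig : List String)
    (m : PySem.Dict String (List Bool)) (k : String) :
    ((sig.foldl (fun m idx => if m.contains idx then m else m.insert idx (f idx)) m).contains k)
      = (decide (k ∈ sig) || m.contains k) := by
  induction sig generalizing m with
  | nil => simp
  | cons x xs ih =>
    simp only [List.foldl_cons, ih, pv_step_contains, List.mem_cons]
    by_cases hk : k = x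
    · simp [hk]
    · have hbx : (k == x) = false := by simp [hk]
      simp [hk, hbx]

-- outer memo loop: contains = occurrence-in-some-signature-or-before
lemma pv_fold2_contains (f : String → List Bool) (sigs : List (String × List String))
    (m : PySem.Dict String (List Bool)) (k : String) :
    ((sigs.foldl (fun m p => p.2.foldl (fun m idx => if m.contains idx then m else m.insert idx (f idx)) m) m).contains k)
      = (decide (k ∈ sigs.flatMap Prod.snd) || m.contains k) := by
  induction sigs generalizing m with
  | nil => simp
  | cons p rest ih =>
    simp only [List.foldl_cons, ih, pv_fold1_contains, List.flatMap_cons, List.mem_append]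
    by_cases hk : k ∈ p.2 <;> simp [hk]

-- one memoization step preserves soundness of stored values
lemma pv_step_get (f : String → List Bool) (m : PySem.Dict String (List Bool)) (idx : String)
    (hm : ∀ k, m.contains k = true → m.get? k = some (f k)) :
    ∀ k, ((if m.contains idx then m else m.insert idx (f idx)).contains k) = true →
      (if m.contains idx then m else m.insert idx (f idx)).get? k = some (f k) := by
  by_cases h : m.contains idx = true
  · simpa [h] using hm
  · simp only [Bool.not_eq_true] at h
    intro k hk
    by_cases hki : k = idx
    · subst hki; simp [h, PySem.Dict.get?_insert_self]
    · rw [if_neg (by simp [h])] at hk ⊢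
      rw [PySem.Dict.contains_insert] at hk
      simp [hki] at hk
      rw [PySem.Dict.get?_insert_of_ne m (f idx) hki]
      exact hm k hk

lemma pv_fold1_get (f : String → List Bool) (sig : List String)
    (m : PySem.Dict String (List Bool))
    (hm : ∀ k, m.contains k = true → m.get? k = some (f k)) :
    ∀ k, ((sig.foldl (fun m idx => if m.contains idx then m else m.insert idx (f idx)) m).contains k) = true →
      (sig.foldl (fun m idx => if m.contains idx then m else m.insert idx (f idx)) m).get? k = some (f k) := by
  induction sig generalizing m with
  | nil => exact hm
  | cons x xs ih => exact ih _ (pv_step_get f m x hm)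

lemma pv_fold2_get (f : String → List Bool) (sigs : List (String × List String))
    (m : PySem.Dict String (List Bool))
    (hm : ∀ k, m.contains k = true → m.get? k = some (f k)) :
    ∀ k, ((sigs.foldl (fun m p => p.2.foldl (fun m idx => if m.contains idx then m else m.insert idx (f idx)) m) m).contains k) = true →
      (sigs.foldl (fun m p => p.2.foldl (fun m idx => if m.contains idx then m else m.insert idx (f idx)) m) m).get? k = some (f k) := by
  induction sigs generalizing m with
  | nil => exact hm
  | cons p rest ih => exact ih _ (pv_fold1_get f p.2 m hm)

-- the stage-1 memo, read back at any index occurring in sigs, is exactly pvMask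
lemma pv_memo_getD (ranks : List (String × Int)) (sigs : List (String × List String))
    (idx_usage : List (String × List (List Int))) (k : String)
    (hk : k ∈ sigs.flatMap Prod.snd) :
    ((pvIdxMaskDict ranks sigs idx_usage).get? k).getD [] = pvMask ranks idx_usage k := by
  have hdict : pvIdxMaskDict ranks sigs idx_usage
      = sigs.foldl (fun m p => p.2.foldl (fun m idx =>
          if m.contains idx then m else m.insert idx (pvMask ranks idx_usage idx)) m)
        PySem.Dict.empty := rfl
  rw [hdict]
  have hc := pv_fold2_contains (pvMask ranks idx_usage) sigs PySem.Dict.empty k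
  rw [pv_fold2_get (pvMask ranks idx_usage) sigs PySem.Dict.empty
      (by intro j hj; simp [PySem.Dict.empty, PySem.Dict.contains] at hj) k
      (by rw [hc]; simp [hk])]
  rfl

-- ---------- B side, stage 2: the guarded insert loop appends the filtered map ----------
lemma pv_phase2 (g : String × List String → List Bool) (sigs : List (String × List String))
    (out : PySem.Dict String (List Bool)) (hnd : (sigs.map Prod.fst).Nodup)
    (hfresh : ∀ p ∈ sigs, out.contains p.1 = false) :
    (sigs.foldl (fun out p => if p.2.isEmpty then out else out.insert p.1 (g p)) out).items
      = out.items ++ (sigs.filter (fun p => !p.2.isEmpty)).map (fun p => (p.1, g p)) := by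
  induction sigs generalizing out with
  | nil => simp
  | cons p rest ih =>
    simp only [List.map_cons, List.nodup_cons] at hnd
    have hfp : out.contains p.1 = false := hfresh p (List.mem_cons_self ..)
    simp only [List.foldl_cons]
    by_cases hemp : p.2.isEmpty
    · rw [if_pos hemp, ih out hnd.2 (fun q hq => hfresh q (List.mem_cons_of_mem _ hq))]
      simp [hemp]
    · rw [if_neg hemp]
      rw [ih _ hnd.2 ?fresh]
      · rw [PySem.Dict.items_insert_of_not_contains out (g p) hfp]
        simp [hemp]
      case fresh =>
        intro q hq
        rw [PySem.Dict.contains_insert]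
        have h1 : out.contains q.1 = false := hfresh q (List.mem_cons_of_mem _ hq)
        have h2 : q.1 ≠ p.1 := by
          intro he; exact hnd.1 (he ▸ List.mem_map_of_mem hq)
        simp [h1, h2]

-- ===== VERDICT (by name: the statement is the Claim_ definition above) =====
theorem highlight_mask_py_spec : Claim_equal_highlight_mask_py := by
  intro ranks sigs shapes idx_usage _hdom hpre
  unfold Spec_highlight_mask_py highlight_mask_py highlight_mask_py_alt
  -- A side
  have hA := pv_outer (pvMask ranks idx_usage) shapes sigs PySem.Dict.empty hpre.1
    (by intro p _; simp [PySem.Dict.empty, PySem.Dict.contains])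
  simp only [pvMask] at hA
  rw [hA]
  -- B side
  rw [pv_phase2 _ sigs PySem.Dict.empty hpre.1
    (by intro p _; simp [PySem.Dict.empty, PySem.Dict.contains])]
  simp only [PySem.Dict.empty, List.nil_append]
  apply List.map_congr_left
  intro p hp
  have hps : p ∈ sigs := List.mem_of_mem_filter hp
  congr 1
  apply List.flatMap_congr
  intro idx hidx
  rw [pv_memo_getD ranks sigs idx_usage idx (List.mem_flatMap.mpr ⟨p, hps, hidx⟩)]
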